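-- pv_equiv track=rewrite | github.com/thehalleyyoung/deppy | tests/test_examples/051_topological_sort_kahn.py | SPEC
-- ===== SOURCE A (Python) =====
-- def SPEC(graph, result):
--     # Collect all nodes
--     all_nodes = set(graph.keys())
--     for targets in graph.values():
--         for t in targets:
--             all_nodes.add(t)
--
--     # Check for cycles using DFS
--     WHITE, GRAY, BLACK = 0, 1, 2
--     color = {v: WHITE for v in all_nodes}
--     has_cycle = [False]
--
--     def dfs(u):
--         color[u] = GRAY
--         for v in graph.get(u, []):
--             if color[v] == GRAY:
--                 has_cycle[0] = True
--                 return
--             if color[v] == WHITE: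
--                 dfs(v)
--                 if has_cycle[0]:
--                     return
--         color[u] = BLACK
--
--     for v in all_nodes:
--         if color[v] == WHITE:
--             dfs(v)
--             if has_cycle[0]:
--                 break
--
--     if has_cycle[0]:
--         # Graph has a cycle, result should be None
--         return result is None
--
--     # Graph is a DAG, result must be a valid topological order
--     if result is None:
--         return False
--     if not isinstance(result, list):
--         return False
--     if set(result) != all_nodes:
--         return False
--     if len(result) != len(all_nodes):
--         return False
--
--     # Check topological property: for every edge u->v, u appears before v
--     pos = {v: i for i, v in enumerate(result)}
--     for u in graph:
--         for v in graph[u]: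
--             if pos[u] >= pos[v]:
--                 return False
--
--     return True
-- ===== SOURCE B (Python) =====
-- def SPEC(graph, result):
--     # Collect all nodes
--     all_nodes = set(graph.keys())
--     for targets in graph.values():
--         for t in targets:
--             all_nodes.add(t)
--
--     # Cycle detection: iterative depth-first traversal with an explicit
--     # stack of (node, remaining successors) frames; `visiting` holds the
--     # nodes on the current path, `visited` the fully processed ones.
--     visiting, visited = set(), set()
--     has_cycle = False
--     for s in all_nodes:
--         if has_cycle:
--             break
--         if s in visited:
--             continue
--         visiting.add(s)
--         stack = [(s, list(graph.get(s, [])))]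
--         while stack:
--             u, rest = stack.pop()
--             if not rest:
--                 visiting.discard(u)
--                 visited.add(u)
--                 continue
--             v, rest = rest[0], rest[1:]
--             stack.append((u, rest))
--             if v in visiting:
--                 has_cycle = True
--                 break
--             if v not in visited:
--                 visiting.add(v)
--                 stack.append((v, list(graph.get(v, []))))
--
--     if has_cycle:
--         # Graph has a cycle, result should be None
--         return result is None
--
--     # Graph is a DAG, result must be a valid topological order
--     if result is None:
--         return False
--     if not isinstance(result, list):
--         return False
--     if set(result) != all_nodes:
--         return False
--     if len(result) != len(all_nodes):
--         return False
--
--     # Check topological property: for every edge u->v, u appears before v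
--     pos = {v: i for i, v in enumerate(result)}
--     for u in graph:
--         for v in graph[u]:
--             if pos[u] >= pos[v]:
--                 return False
--
--     return True
-- ===== Notes on version B (the rewrite author's own statement) =====
-- stated objective: alternative
-- what changed: Replaces A's recursive three-colour DFS (color dict mutated by a nested recursive function with a has_cycle cell) by an iterative depth-first traversal over an explicit stack of (node, remaining-successors) frames with separate visiting/visited sets, so B needs no recursion; the node collection and the DAG/ordering checks are kept.
import Mathlib
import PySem

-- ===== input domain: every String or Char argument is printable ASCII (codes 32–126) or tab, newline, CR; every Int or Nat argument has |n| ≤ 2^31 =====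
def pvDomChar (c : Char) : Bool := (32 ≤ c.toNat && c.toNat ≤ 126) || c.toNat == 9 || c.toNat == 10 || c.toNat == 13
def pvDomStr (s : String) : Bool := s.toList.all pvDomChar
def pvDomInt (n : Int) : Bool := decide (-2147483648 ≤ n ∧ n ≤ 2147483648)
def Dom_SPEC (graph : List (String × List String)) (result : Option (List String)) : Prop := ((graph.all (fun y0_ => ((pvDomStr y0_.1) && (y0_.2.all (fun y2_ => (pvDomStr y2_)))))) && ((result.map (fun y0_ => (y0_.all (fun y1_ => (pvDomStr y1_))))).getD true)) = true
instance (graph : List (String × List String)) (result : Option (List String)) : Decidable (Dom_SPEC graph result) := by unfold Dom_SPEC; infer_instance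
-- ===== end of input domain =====

-- B replaces A's recursive three-colour DFS by an iterative traversal over an
-- explicit stack of (node, remaining-successors) frames with visiting/visited
-- sets; node collection and the DAG/ordering checks are shared ('alternative').

-- ===== SHARED HELPERS (identical Python lines in both programs) =====

-- graph.get(u, [])
def pvSuccs (g : PySem.Dict String (List String)) (u : String) : List String := g.getD u []

-- all_nodes = set(graph.keys()); for targets in graph.values(): for t in targets: all_nodes.add(t)
def pvCollect (g : PySem.Dict String (List String)) : PySem.Set String :=
  g.values.foldl (fun s ts => ts.foldl PySem.Set.add s) (PySem.Set.ofList g.keys)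

-- the DAG-side checks (identical text in Source A and Source B): set/length equality and
-- the pos-based edge check.  pos[u]/pos[v] lookups are total here because the
-- earlier set-equality check guarantees every node of the graph is a key of pos;
-- getD 0 is used on that (unreachable-KeyError) path.
def pvPhase2 (g : PySem.Dict String (List String)) (allNodes : PySem.Set String)
    (res : List String) : Bool :=
  if !(PySem.Set.equal (PySem.Set.ofList res) allNodes) then false
  else if res.length != allNodes.length then false
  else
    let pos : PySem.Dict String Int :=
      res.zipIdx.foldl (fun d p => d.insert p.1 (p.2 : Int)) PySem.Dict.empty
    g.items.foldl (fun ok p =>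
      p.2.foldl (fun ok v => ok && !(decide (pos.getD p.1 0 ≥ pos.getD v 0))) ok) true

-- ===== PORT A =====

-- the for-loop body of dfs(u): WHITE=0 GRAY=1 BLACK=2; returns (color, has_cycle).
-- The inline 'match f' is the recursive call dfs(v); one fuel unit per entry
-- (fuel is a totality device only; the callers pass enough).
def pvGoA (g : PySem.Dict String (List String)) :
    Nat → String → List String → PySem.Dict String Int → PySem.Dict String Int × Bool
  | _, u, [], c => (c.insert u 2, false)            -- loop done: color[u] = BLACK
  | f, u, v :: vs, c =>
    if c.getD v 0 == 1 then (c, true)               -- color[v] == GRAY: has_cycle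
    else if c.getD v 0 == 0 then                    -- color[v] == WHITE: dfs(v)
      match (match f with
             | 0 => (c, false)
             | f' + 1 => pvGoA g f' v (pvSuccs g v) (c.insert v 1)) with
      | (c', true) => (c', true)                    -- if has_cycle[0]: return
      | (c', false) => pvGoA g f u vs c'
    else pvGoA g f u vs c
  termination_by f _ vs _ => (f, vs.length)

-- dfs(u): color[u] = GRAY, then the loop
def pvDfsA (g : PySem.Dict String (List String)) (f : Nat) (u : String)
    (c : PySem.Dict String Int) : PySem.Dict String Int × Bool :=
  match f with
  | 0 => (c, false)
  | f' + 1 => pvGoA g f' u (pvSuccs g u) (c.insert u 1)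

def SPEC (graph : List (String × List String)) (result : Option (List String)) : Bool :=
  let g := PySem.Dict.ofList graph
  let allNodes := pvCollect g
  -- color = {v: WHITE for v in all_nodes}
  let color0 : PySem.Dict String Int :=
    allNodes.foldl (fun d v => d.insert v 0) PySem.Dict.empty
  -- for v in all_nodes: if color[v] == WHITE: dfs(v); if has_cycle[0]: break
  let st := allNodes.foldl (fun (st : PySem.Dict String Int × Bool) v =>
      if st.2 then st
      else if st.1.getD v 0 == 0 then pvDfsA g (allNodes.length + 1) v st.1
      else st) (color0, false)
  if st.2 then decide (result = none)
  else
    match result with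
    | none => false
    | some res => pvPhase2 g allNodes res

-- ===== PORT B =====

-- fuel bound for B's while loop (a totality device only; proven sufficient below)
def pvE (g : PySem.Dict String (List String)) : Nat := (g.values.map List.length).sum
def pvBound (g : PySem.Dict String (List String)) (l f : Nat) : Nat :=
  (2 * l + 2) * (pvE g + 2) ^ f

-- the while loop: stack of (node, remaining successors), visiting/visited sets
def pvRunB (g : PySem.Dict String (List String)) :
    Nat → List (String × List String) → PySem.Set String → PySem.Set String →
    PySem.Set String × PySem.Set String × Bool
  | _, [], vis, vtd => (vis, vtd, false)            -- while stack: exhausted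
  | 0, _, vis, vtd => (vis, vtd, false)             -- fuel (totality device only)
  | f + 1, (u, []) :: rest, vis, vtd =>             -- frame done: move u to visited
      pvRunB g f rest (PySem.Set.discard vis u) (PySem.Set.add vtd u)
  | f + 1, (u, v :: vs) :: rest, vis, vtd =>
      if PySem.Set.contains vis v then (vis, vtd, true)       -- v on current path
      else if !(PySem.Set.contains vtd v) then
        pvRunB g f ((v, pvSuccs g v) :: (u, vs) :: rest) (PySem.Set.add vis v) vtd
      else pvRunB g f ((u, vs) :: rest) vis vtd

def SPEC_alt (graph : List (String × List String)) (result : Option (List String)) : Bool :=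
  let g := PySem.Dict.ofList graph
  let allNodes := pvCollect g
  let fb := pvBound g (pvE g) allNodes.length + 1   -- enough fuel for one root
  let st := allNodes.foldl
      (fun (st : PySem.Set String × PySem.Set String × Bool) s =>
        if st.2.2 then st
        else if PySem.Set.contains st.2.1 s then st
        else pvRunB g fb [(s, pvSuccs g s)] (PySem.Set.add st.1 s) st.2.1)
      (PySem.Set.empty, PySem.Set.empty, false)
  if st.2.2 then decide (result = none)
  else
    match result with
    | none => false
    | some res => pvPhase2 g allNodes res

-- ===== PRECONDITION & SPEC =====
def Spec_SPEC (graph : List (String × List String)) (result : Option (List String)) (out : Bool) : Prop := out = SPEC_alt graph result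
instance (graph : List (String × List String)) (result : Option (List String)) (out : Bool) : Decidable (Spec_SPEC graph result out) := by unfold Spec_SPEC; infer_instance

-- ===== CLAIM (what is proved, stated in full; the proofs are below) =====
def Claim_equal_SPEC : Prop := ∀ (graph : List (String × List String)) (result : Option (List String)), Dom_SPEC graph result → Spec_SPEC graph result (SPEC graph result)

-- ===== LEMMAS AND PROOFS =====

-- A-state (color dict) vs B-state (visiting/visited sets)
def pvR (c : PySem.Dict String Int) (vis vtd : PySem.Set String) : Prop :=
  ∀ x, (c.getD x 0 = 1 ↔ x ∈ vis) ∧ (c.getD x 0 = 2 ↔ x ∈ vtd)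

def pvW (g : PySem.Dict String (List String)) (c : PySem.Dict String Int) : Nat :=
  (pvCollect g).countP (fun x => c.getD x 0 == 0)

theorem pvMem_collect (g : PySem.Dict String (List String)) (x : String) :
    x ∈ pvCollect g ↔ x ∈ g.keys ∨ ∃ ts ∈ g.values, x ∈ ts := by
  have key : ∀ (ll : List (List String)) (s0 : PySem.Set String),
      x ∈ ll.foldl (fun s ts => ts.foldl PySem.Set.add s) s0 ↔ x ∈ s0 ∨ ∃ ts ∈ ll, x ∈ ts := by
    intro ll
    induction ll with
    | nil => simp
    | cons h t ih =>
      intro s0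
      rw [List.foldl_cons, ih]
      rw [show (h.foldl PySem.Set.add s0) = PySem.Set.update s0 h from rfl,
        PySem.Set.mem_update]
      simp only [List.mem_cons]
      constructor
      · rintro ((hx | hx) | ⟨ts, hts, hx⟩)
        · exact Or.inl hx
        · exact Or.inr ⟨h, Or.inl rfl, hx⟩
        · exact Or.inr ⟨ts, Or.inr hts, hx⟩
      · rintro (hx | ⟨ts, (rfl | hts), hx⟩)
        · exact Or.inl (Or.inl hx)
        · exact Or.inl (Or.inr hx)
        · exact Or.inr ⟨ts, hts, hx⟩
  unfold pvCollect
  rw [key, PySem.Set.mem_ofList]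

theorem pvSuccs_mem_collect (g : PySem.Dict String (List String)) (u t : String)
    (h : t ∈ pvSuccs g u) : t ∈ pvCollect g := by
  rw [pvMem_collect]
  unfold pvSuccs at h
  rw [PySem.Dict.getD_eq_get?_getD] at h
  cases hget : g.get? u with
  | none => rw [hget] at h; simp at h
  | some ts =>
    rw [hget] at h
    refine Or.inr ⟨ts, ?_, h⟩
    have hi := PySem.Dict.mem_items_of_get?_eq_some _ hget
    simp only [PySem.Dict.values]
    exact List.mem_map.2 ⟨(u, ts), hi, rfl⟩

theorem pvSuccs_len_le (g : PySem.Dict String (List String)) (u : String) :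
    (pvSuccs g u).length ≤ pvE g := by
  unfold pvSuccs pvE
  rw [PySem.Dict.getD_eq_get?_getD]
  cases hget : g.get? u with
  | none => simp
  | some ts =>
    have hi := PySem.Dict.mem_items_of_get?_eq_some _ hget
    have hts : ts ∈ g.values := by
      simp only [PySem.Dict.values]; exact List.mem_map.2 ⟨(u, ts), hi, rfl⟩
    simpa using List.single_le_sum (l := g.values.map List.length) (by intros; omega)
      _ (List.mem_map.2 ⟨ts, hts, rfl⟩)

theorem pvR_insert1 (c : PySem.Dict String Int) (vis vtd : PySem.Set String) (v : String)
    (hR : pvR c vis vtd) (hw : c.getD v 0 = 0) :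
    pvR (c.insert v 1) (PySem.Set.add vis v) vtd := by
  intro x
  obtain ⟨h1, h2⟩ := hR x
  by_cases hx : x = v
  · subst hx
    rw [PySem.Dict.getD_insert_self]
    simp only [PySem.Set.mem_add]
    constructor
    · simp
    · constructor
      · intro h; omega
      · intro h
        have := (h2.2 h); rw [this] at hw; omega
  · rw [PySem.Dict.getD_insert_of_ne _ _ _ hx, PySem.Set.mem_add]
    constructor
    · rw [h1]; tauto
    · exact h2

theorem pvR_finish (c : PySem.Dict String Int) (vis vtd : PySem.Set String) (u : String)
    (hR : pvR c vis vtd) (hg : c.getD u 0 = 1) :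
    pvR (c.insert u 2) (PySem.Set.discard vis u) (PySem.Set.add vtd u) := by
  intro x
  obtain ⟨h1, h2⟩ := hR x
  by_cases hx : x = u
  · subst hx
    rw [PySem.Dict.getD_insert_self]
    simp [PySem.Set.mem_add, PySem.Set.mem_discard]
  · rw [PySem.Dict.getD_insert_of_ne _ _ _ hx, PySem.Set.mem_add, PySem.Set.mem_discard]
    constructor
    · rw [h1]; tauto
    · rw [h2]; tauto

theorem pvCountP_lt (S : List String) (φ ψ : String → Bool) (v : String)
    (hmono : ∀ x ∈ S, ψ x = true → φ x = true)
    (hv : v ∈ S) (hφ : φ v = true) (hψ : ψ v = false) :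
    S.countP ψ < S.countP φ := by
  induction S with
  | nil => cases hv
  | cons a t ih =>
    rw [List.countP_cons, List.countP_cons]
    rcases List.mem_cons.1 hv with rfl | hvt
    · rw [hφ, hψ]
      have : t.countP ψ ≤ t.countP φ :=
        List.countP_mono_left (fun x hx => hmono x (List.mem_cons_of_mem _ hx))
      simp only [show (false = true) = False by simp, if_false, if_true]
      omega
    · have hlt : t.countP ψ < t.countP φ :=
        ih (fun x hx => hmono x (List.mem_cons_of_mem _ hx)) hvt
      have : (if ψ a then 1 else 0) ≤ (if φ a then 1 else 0) := by
        by_cases h : ψ a = true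
        · rw [if_pos h, if_pos (hmono a (List.mem_cons_self) h)]
        · simp only [Bool.not_eq_true] at h; rw [if_neg (by simp [h])]; omega
      omega

theorem pvW_insert1_lt (g : PySem.Dict String (List String)) (c : PySem.Dict String Int)
    (v : String) (hv : v ∈ pvCollect g) (hw : c.getD v 0 = 0) :
    pvW g (c.insert v 1) < pvW g c := by
  unfold pvW
  refine pvCountP_lt _ _ _ v (fun x hx h => ?_) hv (by simp [hw]) (by simp)
  by_cases hxv : x = v
  · subst hxv; rw [PySem.Dict.getD_insert_self] at h; simp at h
  · rwa [PySem.Dict.getD_insert_of_ne _ _ _ hxv] at h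

theorem pvW_le_of_pointwise (g : PySem.Dict String (List String))
    (c c' : PySem.Dict String Int) (u : String)
    (hu : c'.getD u 0 = 2)
    (h : ∀ x, x ≠ u → c'.getD x 0 = c.getD x 0 ∨ (c.getD x 0 = 0 ∧ c'.getD x 0 = 2)) :
    pvW g c' ≤ pvW g c := by
  unfold pvW
  refine List.countP_mono_left (fun x _ hx => ?_)
  simp only [beq_iff_eq] at hx ⊢
  by_cases hxu : x = u
  · subst hxu; rw [hu] at hx; omega
  · rcases h x hxu with he | ⟨_, h2⟩
    · rw [← he]; exact hx
    · rw [h2] at hx; omega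

theorem pvW_le_length (g : PySem.Dict String (List String)) (c : PySem.Dict String Int) :
    pvW g c ≤ (pvCollect g).length := by
  exact List.countP_le_length

-- unfolding equations for the two runners
theorem pvGoA_nil (g : PySem.Dict String (List String)) (f : Nat) (u : String)
    (c : PySem.Dict String Int) : pvGoA g f u [] c = (c.insert u 2, false) := by
  simp [pvGoA]

theorem pvGoA_gray (g : PySem.Dict String (List String)) (f : Nat) (u v : String)
    (vs : List String) (c : PySem.Dict String Int) (h : c.getD v 0 = 1) :
    pvGoA g f u (v :: vs) c = (c, true) := by
  rw [pvGoA.eq_def]; simp [h]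

theorem pvGoA_skip (g : PySem.Dict String (List String)) (f : Nat) (u v : String)
    (vs : List String) (c : PySem.Dict String Int) (h0 : ¬ c.getD v 0 = 0)
    (h1 : ¬ c.getD v 0 = 1) : pvGoA g f u (v :: vs) c = pvGoA g f u vs c := by
  rw [pvGoA.eq_def]; simp [h0, h1]

theorem pvGoA_white_false (g : PySem.Dict String (List String)) (f : Nat) (u v : String)
    (vs : List String) (c c' : PySem.Dict String Int) (h0 : c.getD v 0 = 0)
    (hin : pvGoA g f v (pvSuccs g v) (c.insert v 1) = (c', false)) :
    pvGoA g (f + 1) u (v :: vs) c = pvGoA g (f + 1) u vs c' := by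
  rw [pvGoA.eq_def]; simp [h0, hin]

theorem pvGoA_white_true (g : PySem.Dict String (List String)) (f : Nat) (u v : String)
    (vs : List String) (c c' : PySem.Dict String Int) (h0 : c.getD v 0 = 0)
    (hin : pvGoA g f v (pvSuccs g v) (c.insert v 1) = (c', true)) :
    pvGoA g (f + 1) u (v :: vs) c = (c', true) := by
  rw [pvGoA.eq_def]; simp [h0, hin]

theorem pvRunB_nil (g : PySem.Dict String (List String)) (m : Nat)
    (vis vtd : PySem.Set String) : pvRunB g m [] vis vtd = (vis, vtd, false) := by
  cases m <;> rfl

theorem pvRunB_finish (g : PySem.Dict String (List String)) (m : Nat) (u : String)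
    (rest : List (String × List String)) (vis vtd : PySem.Set String) :
    pvRunB g (m + 1) ((u, []) :: rest) vis vtd
      = pvRunB g m rest (vis.discard u) (vtd.add u) := rfl

theorem pvRunB_gray (g : PySem.Dict String (List String)) (m : Nat) (u v : String)
    (vs : List String) (rest : List (String × List String)) (vis vtd : PySem.Set String)
    (h : v ∈ vis) : pvRunB g (m + 1) ((u, v :: vs) :: rest) vis vtd = (vis, vtd, true) := by
  rw [pvRunB]; simp [h]

theorem pvRunB_push (g : PySem.Dict String (List String)) (m : Nat) (u v : String)
    (vs : List String) (rest : List (String × List String)) (vis vtd : PySem.Set String)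
    (h : ¬ v ∈ vis) (h2 : ¬ v ∈ vtd) :
    pvRunB g (m + 1) ((u, v :: vs) :: rest) vis vtd
      = pvRunB g m ((v, pvSuccs g v) :: (u, vs) :: rest) (vis.add v) vtd := by
  rw [pvRunB]; simp [h, h2]

theorem pvRunB_skip (g : PySem.Dict String (List String)) (m : Nat) (u v : String)
    (vs : List String) (rest : List (String × List String)) (vis vtd : PySem.Set String)
    (h : ¬ v ∈ vis) (h2 : v ∈ vtd) :
    pvRunB g (m + 1) ((u, v :: vs) :: rest) vis vtd
      = pvRunB g m ((u, vs) :: rest) vis vtd := by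
  rw [pvRunB]; simp [h, h2]

-- the main simulation: A's dfs loop vs B's stack machine
theorem pvSim (g : PySem.Dict String (List String)) :
    ∀ f vs u c vis vtd,
    pvR c vis vtd → c.getD u 0 = 1 → (∀ t ∈ vs, t ∈ pvCollect g) →
    (∀ x, c.getD x 0 = 0 ∨ c.getD x 0 = 1 ∨ c.getD x 0 = 2) → pvW g c < f →
    (((pvGoA g f u vs c).2 = true →
       ∃ k vT dT, k + 1 ≤ pvBound g vs.length f ∧
         ∀ m rest, pvRunB g (k + m + 1) ((u, vs) :: rest) vis vtd = (vT, dT, true)) ∧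
     ((pvGoA g f u vs c).2 = false →
       ((pvGoA g f u vs c).1.getD u 0 = 2) ∧
       (∀ x, x ≠ u → (pvGoA g f u vs c).1.getD x 0 = c.getD x 0 ∨
           (c.getD x 0 = 0 ∧ (pvGoA g f u vs c).1.getD x 0 = 2)) ∧
       ∃ k vis' vtd', k ≤ pvBound g vs.length f ∧ pvR (pvGoA g f u vs c).1 vis' vtd' ∧
         ∀ m rest, pvRunB g (k + m) ((u, vs) :: rest) vis vtd = pvRunB g m rest vis' vtd')) := by
  intro f
  induction f using Nat.strong_induction_on with
  | _ f IHf =>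
  intro vs
  induction vs with
  | nil =>
    intro u c vis vtd hR hu hvs hvals hf
    rw [pvGoA_nil]
    have hX : 1 ≤ (pvE g + 2) ^ f := Nat.one_le_pow _ _ (by omega)
    constructor
    · intro h; simp at h
    · intro _
      refine ⟨by rw [PySem.Dict.getD_insert_self],
        fun x hx => Or.inl (PySem.Dict.getD_insert_of_ne _ _ _ hx),
        1, vis.discard u, vtd.add u, ?_, pvR_finish c vis vtd u hR hu, ?_⟩
      · unfold pvBound; nlinarith
      · intro m rest
        rw [show 1 + m = m + 1 from by omega, pvRunB_finish]
  | cons v vs' ihvs =>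
    intro u c vis vtd hR hu hvs hvals hf
    have hX : 1 ≤ (pvE g + 2) ^ f := Nat.one_le_pow _ _ (by omega)
    have hvcol : v ∈ pvCollect g := hvs v List.mem_cons_self
    have hvs' : ∀ t ∈ vs', t ∈ pvCollect g := fun t ht => hvs t (List.mem_cons_of_mem _ ht)
    by_cases hv1 : c.getD v 0 = 1
    · -- GRAY successor: cycle found at once
      rw [pvGoA_gray g f u v vs' c hv1]
      constructor
      · intro _
        refine ⟨0, vis, vtd, by unfold pvBound; nlinarith, fun m rest => ?_⟩
        rw [show 0 + m + 1 = m + 1 from by omega]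
        exact pvRunB_gray g m u v vs' rest vis vtd ((hR v).1.1 hv1)
      · intro h; simp at h
    · by_cases hv0 : c.getD v 0 = 0
      · -- WHITE successor: recurse
        cases f with
        | zero => omega
        | succ f' =>
          have hXf' : 1 ≤ (pvE g + 2) ^ f' := Nat.one_le_pow _ _ (by omega)
          have hpow : (pvE g + 2) ^ (f' + 1) = (pvE g + 2) ^ f' * (pvE g + 2) := pow_succ _ _
          have hsv : (pvSuccs g v).length ≤ pvE g := pvSuccs_len_le g v
          have hR1 := pvR_insert1 c vis vtd v hR hv0
          have hu1 : (c.insert v 1).getD v 0 = 1 := PySem.Dict.getD_insert_self _ _ _ _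
          have hvals1 : ∀ x, (c.insert v 1).getD x 0 = 0 ∨ (c.insert v 1).getD x 0 = 1 ∨
              (c.insert v 1).getD x 0 = 2 := by
            intro x
            by_cases hxv : x = v
            · subst hxv; rw [PySem.Dict.getD_insert_self]; omega
            · rw [PySem.Dict.getD_insert_of_ne _ _ _ hxv]; exact hvals x
          have hW1 : pvW g (c.insert v 1) < f' := by
            have := pvW_insert1_lt g c v hvcol hv0; omega
          have hnotvis : v ∉ vis := fun h => hv1 ((hR v).1.2 h)
          have hnotvtd : v ∉ vtd := fun h => by have := (hR v).2.2 h; omega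
          have hne : u ≠ v := fun e => by rw [e, hv0] at hu; omega
          obtain ⟨IHtrue, IHfalse⟩ := IHf f' (by omega) (pvSuccs g v) v (c.insert v 1)
            (vis.add v) vtd hR1 hu1 (fun t ht => pvSuccs_mem_collect g v t ht) hvals1 hW1
          cases hinner : pvGoA g f' v (pvSuccs g v) (c.insert v 1) with
          | mk c2 b2 =>
            cases b2 with
            | true =>
              obtain ⟨k1, vT, dT, hb1, hrun1⟩ := IHtrue (by rw [hinner])
              rw [pvGoA_white_true g f' u v vs' c c2 hv0 hinner]
              constructor
              · intro _
                refine ⟨k1 + 1, vT, dT, ?_, fun m rest => ?_⟩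
                · unfold pvBound at hb1 ⊢
                  rw [hpow]
                  simp only [List.length_cons]
                  have h1' : k1 + 1 ≤ (2 * pvE g + 2) * (pvE g + 2) ^ f' :=
                    le_trans hb1 (Nat.mul_le_mul_right ((pvE g + 2) ^ f') (show 2 * (pvSuccs g v).length + 2 ≤ 2 * pvE g + 2 by omega))
                  have t1 : k1 + 1 + 1 ≤ (2 * pvE g + 2) * (pvE g + 2) ^ f'
                      + 2 * (pvE g + 2) ^ f' := Nat.add_le_add h1' (by omega)
                  have t2 : (2 * pvE g + 2) * (pvE g + 2) ^ f' + 2 * (pvE g + 2) ^ f'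
                      = 2 * ((pvE g + 2) ^ f' * (pvE g + 2)) := by ring
                  have t3 : 2 * ((pvE g + 2) ^ f' * (pvE g + 2))
                      ≤ (2 * (vs'.length + 1) + 2) * ((pvE g + 2) ^ f' * (pvE g + 2)) :=
                    Nat.mul_le_mul_right _ (by omega)
                  exact le_trans (le_trans t1 (le_of_eq t2)) t3
                · rw [show k1 + 1 + m + 1 = (k1 + m + 1) + 1 from by omega,
                    pvRunB_push g _ u v vs' rest vis vtd hnotvis hnotvtd]
                  exact hrun1 m ((u, vs') :: rest)
              · intro h; simp at h
            | false =>
              obtain ⟨hu2, hpt2, k1, vis2, vtd2, hb1, hR2, hrun1⟩ := IHfalse (by rw [hinner])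
              rw [hinner] at hu2 hpt2 hR2
              simp only at hu2 hpt2 hR2
              rw [pvGoA_white_false g f' u v vs' c c2 hv0 hinner]
              have hu2' : c2.getD u 0 = 1 := by
                rcases hpt2 u hne with he | ⟨h0, _⟩
                · rw [he, PySem.Dict.getD_insert_of_ne _ _ _ hne]; exact hu
                · rw [PySem.Dict.getD_insert_of_ne _ _ _ hne] at h0; omega
              have hvals2 : ∀ x, c2.getD x 0 = 0 ∨ c2.getD x 0 = 1 ∨ c2.getD x 0 = 2 := by
                intro x
                by_cases hxv : x = v
                · subst hxv; rw [hu2]; omega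
                · rcases hpt2 x hxv with he | ⟨_, h2⟩
                  · rw [he]; exact hvals1 x
                  · rw [h2]; omega
              have hW2 : pvW g c2 < f' + 1 := by
                have := pvW_le_of_pointwise g (c.insert v 1) c2 v hu2 hpt2; omega
              obtain ⟨IH2true, IH2false⟩ := ihvs u c2 vis2 vtd2 hR2 hu2' hvs' hvals2 hW2
              cases hfin : pvGoA g (f' + 1) u vs' c2 with
              | mk c3 b3 =>
                rw [hfin] at IH2true IH2false
                cases b3 with
                | true =>
                  obtain ⟨k3, vT, dT, hb3, hrun3⟩ := IH2true rfl
                  constructor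
                  · intro _
                    refine ⟨1 + k1 + k3, vT, dT, ?_, fun m rest => ?_⟩
                    · unfold pvBound at hb1 hb3 ⊢
                      rw [hpow] at hb3 ⊢
                      simp only [List.length_cons]
                      have h1' : k1 ≤ (2 * pvE g + 2) * (pvE g + 2) ^ f' :=
                        le_trans hb1 (Nat.mul_le_mul_right ((pvE g + 2) ^ f') (show 2 * (pvSuccs g v).length + 2 ≤ 2 * pvE g + 2 by omega))
                      have he : 1 + k1 + k3 + 1 = (k1 + (k3 + 1)) + 1 := by omega
                      rw [he]
                      have t1 : (k1 + (k3 + 1)) + 1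
                          ≤ ((2 * pvE g + 2) * (pvE g + 2) ^ f'
                            + (2 * vs'.length + 2) * ((pvE g + 2) ^ f' * (pvE g + 2)))
                            + 2 * (pvE g + 2) ^ f' :=
                        Nat.add_le_add (Nat.add_le_add h1' hb3) (by omega)
                      refine le_trans t1 (le_of_eq ?_)
                      ring
                    · rw [show 1 + k1 + k3 + m + 1 = (k1 + (k3 + m + 1)) + 1 from by omega,
                        pvRunB_push g _ u v vs' rest vis vtd hnotvis hnotvtd,
                        hrun1 (k3 + m + 1) ((u, vs') :: rest)]
                      exact hrun3 m rest
                  · intro h; simp at h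
                | false =>
                  obtain ⟨hu3, hpt3, k3, vis3, vtd3, hb3, hR3, hrun3⟩ := IH2false rfl
                  simp only at hu3 hpt3 hR3
                  constructor
                  · intro h; simp at h
                  · intro _
                    refine ⟨hu3, ?_, 1 + k1 + k3, vis3, vtd3, ?_, hR3, fun m rest => ?_⟩
                    · intro x hxu
                      by_cases hxv : x = v
                      · subst hxv
                        have h3 : c3.getD x 0 = 2 := by
                          rcases hpt3 x hxu with he | ⟨_, h2⟩
                          · rw [he]; exact hu2
                          · exact h2
                        exact Or.inr ⟨hv0, h3⟩
                      · have h1x : (c.insert v 1).getD x 0 = c.getD x 0 :=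
                          PySem.Dict.getD_insert_of_ne _ _ _ hxv
                        rcases hpt3 x hxu with he3 | ⟨h20, h32⟩
                        · rcases hpt2 x hxv with he2 | ⟨h10, h22⟩
                          · exact Or.inl (by rw [he3, he2, h1x])
                          · exact Or.inr ⟨by rw [← h1x]; exact h10, by rw [he3]; exact h22⟩
                        · rcases hpt2 x hxv with he2 | ⟨h10, h22⟩
                          · exact Or.inr ⟨by rw [← h1x, ← he2]; exact h20, h32⟩
                          · rw [h22] at h20; omega
                    · unfold pvBound at hb1 hb3 ⊢
                      rw [hpow] at hb3 ⊢
                      simp only [List.length_cons]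
                      have h1' : k1 ≤ (2 * pvE g + 2) * (pvE g + 2) ^ f' :=
                        le_trans hb1 (Nat.mul_le_mul_right ((pvE g + 2) ^ f') (show 2 * (pvSuccs g v).length + 2 ≤ 2 * pvE g + 2 by omega))
                      have t1 : 1 + k1 + k3 ≤ (2 * (pvE g + 2) ^ f'
                          + (2 * pvE g + 2) * (pvE g + 2) ^ f')
                          + (2 * vs'.length + 2) * ((pvE g + 2) ^ f' * (pvE g + 2)) :=
                        Nat.add_le_add (Nat.add_le_add (by omega) h1') hb3
                      have t2 : (2 * (pvE g + 2) ^ f' + (2 * pvE g + 2) * (pvE g + 2) ^ f')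
                          + (2 * vs'.length + 2) * ((pvE g + 2) ^ f' * (pvE g + 2))
                          = (2 * (vs'.length + 1) + 2) * ((pvE g + 2) ^ f' * (pvE g + 2)) := by
                        ring
                      exact le_trans t1 (le_of_eq t2)
                    · rw [show 1 + k1 + k3 + m = (k1 + (k3 + m)) + 1 from by omega,
                        pvRunB_push g _ u v vs' rest vis vtd hnotvis hnotvtd,
                        hrun1 (k3 + m) ((u, vs') :: rest)]
                      exact hrun3 m rest
      · -- BLACK successor: skip
        have hv2 : c.getD v 0 = 2 := by rcases hvals v with h | h | h <;> omega
        have hmem : v ∈ vtd := (hR v).2.1 hv2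
        have hnotvis : v ∉ vis := fun h => hv1 ((hR v).1.2 h)
        rw [pvGoA_skip g f u v vs' c hv0 hv1]
        obtain ⟨IHtrue, IHfalse⟩ := ihvs u c vis vtd hR hu hvs' hvals hf
        cases hfin : pvGoA g f u vs' c with
        | mk c3 b3 =>
          rw [hfin] at IHtrue IHfalse
          cases b3 with
          | true =>
            obtain ⟨k3, vT, dT, hb3, hrun3⟩ := IHtrue rfl
            constructor
            · intro _
              refine ⟨k3 + 1, vT, dT, ?_, fun m rest => ?_⟩
              · unfold pvBound at hb3 ⊢
                simp only [List.length_cons]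
                have t1 : k3 + 1 + 1 ≤ (2 * vs'.length + 2) * (pvE g + 2) ^ f
                    + 2 * (pvE g + 2) ^ f := Nat.add_le_add hb3 (by omega)
                have t2 : (2 * vs'.length + 2) * (pvE g + 2) ^ f + 2 * (pvE g + 2) ^ f
                    = (2 * (vs'.length + 1) + 2) * (pvE g + 2) ^ f := by ring
                exact le_trans t1 (le_of_eq t2)
              · rw [show k3 + 1 + m + 1 = (k3 + m + 1) + 1 from by omega,
                  pvRunB_skip g _ u v vs' rest vis vtd hnotvis hmem]
                exact hrun3 m rest
            · intro h; simp at h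
          | false =>
            obtain ⟨hu3, hpt3, k3, vis3, vtd3, hb3, hR3, hrun3⟩ := IHfalse rfl
            simp only at hu3 hpt3 hR3
            constructor
            · intro h; simp at h
            · intro _
              refine ⟨hu3, fun x hxu => hpt3 x hxu, k3 + 1, vis3, vtd3, ?_, hR3,
                fun m rest => ?_⟩
              · unfold pvBound at hb3 ⊢
                simp only [List.length_cons]
                have t1 : k3 + 1 ≤ (2 * vs'.length + 2) * (pvE g + 2) ^ f
                    + 2 * (pvE g + 2) ^ f := Nat.add_le_add hb3 (by omega)
                have t2 : (2 * vs'.length + 2) * (pvE g + 2) ^ f + 2 * (pvE g + 2) ^ f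
                    = (2 * (vs'.length + 1) + 2) * (pvE g + 2) ^ f := by ring
                exact le_trans t1 (le_of_eq t2)
              · rw [show k3 + 1 + m = (k3 + m) + 1 from by omega,
                  pvRunB_skip g _ u v vs' rest vis vtd hnotvis hmem]
                exact hrun3 m rest

-- once has_cycle is set, both outer loops only carry the state through
theorem pvStallA (g : PySem.Dict String (List String)) (l : List String)
    (c : PySem.Dict String Int) :
    (l.foldl (fun st v =>
        if st.2 then st
        else if st.1.getD v 0 == 0 then pvDfsA g ((pvCollect g).length + 1) v st.1
        else st) (c, true)).2 = true := by
  induction l with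
  | nil => rfl
  | cons a t ih => simpa using ih

theorem pvStallB (g : PySem.Dict String (List String)) (l : List String)
    (vT dT : PySem.Set String) :
    (l.foldl (fun (st : PySem.Set String × PySem.Set String × Bool) s =>
        if st.2.2 then st
        else if PySem.Set.contains st.2.1 s then st
        else pvRunB g (pvBound g (pvE g) (pvCollect g).length + 1)
          [(s, pvSuccs g s)] (PySem.Set.add st.1 s) st.2.1) (vT, dT, true)).2.2 = true := by
  induction l with
  | nil => rfl
  | cons a t ih => simpa using ih

-- outer loops agree
theorem pvOuter (g : PySem.Dict String (List String)) :
    ∀ (l : List String) (c : PySem.Dict String Int) (vis vtd : PySem.Set String),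
    (∀ x ∈ l, x ∈ pvCollect g) → pvR c vis vtd →
    (∀ x, c.getD x 0 = 0 ∨ c.getD x 0 = 2) →
    (l.foldl (fun st v =>
        if st.2 then st
        else if st.1.getD v 0 == 0 then pvDfsA g ((pvCollect g).length + 1) v st.1
        else st) (c, false)).2 =
    (l.foldl (fun (st : PySem.Set String × PySem.Set String × Bool) s =>
        if st.2.2 then st
        else if PySem.Set.contains st.2.1 s then st
        else pvRunB g (pvBound g (pvE g) (pvCollect g).length + 1)
          [(s, pvSuccs g s)] (PySem.Set.add st.1 s) st.2.1) (vis, vtd, false)).2.2 := by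
  intro l
  induction l with
  | nil => intro c vis vtd _ _ _; rfl
  | cons s t ih =>
    intro c vis vtd hmem hR hvals02
    have hscol : s ∈ pvCollect g := hmem s List.mem_cons_self
    have hmem' : ∀ x ∈ t, x ∈ pvCollect g := fun x hx => hmem x (List.mem_cons_of_mem _ hx)
    simp only [List.foldl_cons]
    by_cases hs0 : c.getD s 0 = 0
    · -- root s is white: A runs dfs(s), B runs the stack machine from [(s, succs s)]
      have hs_nvtd : s ∉ vtd := fun h => by have := (hR s).2.2 h; omega
      have hcontains : PySem.Set.contains vtd s = false := by
        rw [← Bool.not_eq_true, PySem.Set.contains_iff]; exact hs_nvtd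
      have hR1 := pvR_insert1 c vis vtd s hR hs0
      have hu1 : (c.insert s 1).getD s 0 = 1 := PySem.Dict.getD_insert_self _ _ _ _
      have hvals1 : ∀ x, (c.insert s 1).getD x 0 = 0 ∨ (c.insert s 1).getD x 0 = 1 ∨
          (c.insert s 1).getD x 0 = 2 := by
        intro x
        by_cases hxs : x = s
        · subst hxs; rw [PySem.Dict.getD_insert_self]; omega
        · rw [PySem.Dict.getD_insert_of_ne _ _ _ hxs]; rcases hvals02 x with h | h <;> omega
      have hf : pvW g (c.insert s 1) < (pvCollect g).length := by
        have h1 := pvW_insert1_lt g c s hscol hs0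
        have h2 := pvW_le_length g c
        omega
      obtain ⟨Ptrue, Pfalse⟩ := pvSim g (pvCollect g).length (pvSuccs g s) s (c.insert s 1)
        (vis.add s) vtd hR1 hu1 (fun x hx => pvSuccs_mem_collect g s x hx) hvals1 hf
      have hsv : (pvSuccs g s).length ≤ pvE g := pvSuccs_len_le g s
      have hmono : pvBound g (pvSuccs g s).length (pvCollect g).length
          ≤ pvBound g (pvE g) (pvCollect g).length :=
        Nat.mul_le_mul_right _ (by omega)
      cases hgo : pvGoA g (pvCollect g).length s (pvSuccs g s) (c.insert s 1) with
      | mk c' b =>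
        rw [hgo] at Ptrue Pfalse
        have hAstep : (if (c, false).2 then (c, false)
            else if (c, false).1.getD s 0 == 0
            then pvDfsA g ((pvCollect g).length + 1) s (c, false).1 else (c, false)) = (c', b) := by
          simp only [if_neg Bool.false_ne_true]
          rw [if_pos (by simp [hs0])]
          show pvGoA g (pvCollect g).length s (pvSuccs g s) (c.insert s 1) = (c', b)
          exact hgo
        rw [hAstep]
        cases b with
        | false =>
          obtain ⟨hu', hpt, k, vis', vtd', hb, hR', hrun⟩ := Pfalse rfl
          simp only at hu' hpt hR'
          have hk : k ≤ pvBound g (pvE g) (pvCollect g).length := le_trans hb hmono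
          have hBstep : (if ((vis, vtd, false) :
                PySem.Set String × PySem.Set String × Bool).2.2 then (vis, vtd, false)
              else if PySem.Set.contains (vis, vtd, false).2.1 s then (vis, vtd, false)
              else pvRunB g (pvBound g (pvE g) (pvCollect g).length + 1)
                [(s, pvSuccs g s)] (PySem.Set.add (vis, vtd, false).1 s) (vis, vtd, false).2.1)
              = (vis', vtd', false) := by
            simp only [hcontains, Bool.false_eq_true, if_false]
            rw [show pvBound g (pvE g) (pvCollect g).length + 1
                = k + (pvBound g (pvE g) (pvCollect g).length + 1 - k) from by omega]
            rw [hrun (pvBound g (pvE g) (pvCollect g).length + 1 - k) []]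
            exact pvRunB_nil g _ vis' vtd'
          rw [hBstep]
          refine ih c' vis' vtd' hmem' hR' ?_
          intro x
          by_cases hxs : x = s
          · subst hxs; rw [hu']; omega
          · rcases hpt x hxs with he | ⟨_, h2⟩
            · rw [he, PySem.Dict.getD_insert_of_ne _ _ _ hxs]; exact hvals02 x
            · rw [h2]; omega
        | true =>
          obtain ⟨k, vT, dT, hb, hrun⟩ := Ptrue rfl
          have hk : k + 1 ≤ pvBound g (pvE g) (pvCollect g).length := le_trans hb hmono
          have hBstep : (if ((vis, vtd, false) :
                PySem.Set String × PySem.Set String × Bool).2.2 then (vis, vtd, false)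
              else if PySem.Set.contains (vis, vtd, false).2.1 s then (vis, vtd, false)
              else pvRunB g (pvBound g (pvE g) (pvCollect g).length + 1)
                [(s, pvSuccs g s)] (PySem.Set.add (vis, vtd, false).1 s) (vis, vtd, false).2.1)
              = (vT, dT, true) := by
            simp only [hcontains, Bool.false_eq_true, if_false]
            obtain ⟨m, hm⟩ := Nat.exists_eq_add_of_le hk
            rw [hm, show k + 1 + m + 1 = k + (m + 1) + 1 from by omega]
            exact hrun _ []
          rw [hBstep, pvStallA g t c', pvStallB g t vT dT]
    · -- root s is already BLACK: both sides skip it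
      have hs2 : c.getD s 0 = 2 := by rcases hvals02 s with h | h <;> omega
      have hcontains : PySem.Set.contains vtd s = true :=
        (PySem.Set.contains_iff _ _).2 ((hR s).2.1 hs2)
      have hAstep : (if (c, false).2 then (c, false)
          else if (c, false).1.getD s 0 == 0
          then pvDfsA g ((pvCollect g).length + 1) s (c, false).1 else (c, false)) = (c, false) := by
        simp only [if_neg Bool.false_ne_true]
        rw [if_neg (by simp [hs0])]
      have hBstep : (if ((vis, vtd, false) :
            PySem.Set String × PySem.Set String × Bool).2.2 then (vis, vtd, false)
          else if PySem.Set.contains (vis, vtd, false).2.1 s then (vis, vtd, false)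
          else pvRunB g (pvBound g (pvE g) (pvCollect g).length + 1)
            [(s, pvSuccs g s)] (PySem.Set.add (vis, vtd, false).1 s) (vis, vtd, false).2.1)
          = (vis, vtd, false) := by
        simp only [if_neg Bool.false_ne_true, hcontains, if_true]
      rw [hAstep, hBstep]
      exact ih c vis vtd hmem' hR hvals02

-- the initial color dict maps everything to WHITE
theorem pvInit0 (l : List String) :
    ∀ (d : PySem.Dict String Int), (∀ x, d.getD x 0 = 0) →
    ∀ x, (l.foldl (fun d v => d.insert v 0) d).getD x 0 = 0 := by
  induction l with
  | nil => intro d hd x; exact hd x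
  | cons a t ih =>
    intro d hd x
    refine ih _ (fun y => ?_) x
    by_cases hya : y = a
    · subst hya; exact PySem.Dict.getD_insert_self _ _ _ _
    · rw [PySem.Dict.getD_insert_of_ne _ _ _ hya]; exact hd y

-- ===== VERDICT (by name: the statement is the Claim_ definition above) =====
theorem SPEC_spec : Claim_equal_SPEC := by
  intro graph result _
  unfold Spec_SPEC
  simp only [SPEC, SPEC_alt]
  have hinit : ∀ x, ((pvCollect (PySem.Dict.ofList graph)).foldl
      (fun d v => d.insert v 0) (PySem.Dict.empty : PySem.Dict String Int)).getD x 0 = 0 :=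
    pvInit0 _ _ (fun x => PySem.Dict.getD_empty x 0)
  have hR0 : pvR ((pvCollect (PySem.Dict.ofList graph)).foldl
      (fun d v => d.insert v 0) (PySem.Dict.empty : PySem.Dict String Int))
      PySem.Set.empty PySem.Set.empty := by
    intro x
    rw [hinit x]
    constructor
    · constructor
      · intro h; omega
      · intro h; cases h
    · constructor
      · intro h; omega
      · intro h; cases h
  have h := pvOuter (PySem.Dict.ofList graph) (pvCollect (PySem.Dict.ofList graph))
    ((pvCollect (PySem.Dict.ofList graph)).foldl (fun d v => d.insert v 0)
      (PySem.Dict.empty : PySem.Dict String Int))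
    PySem.Set.empty PySem.Set.empty (fun x hx => hx) hR0 (fun x => Or.inl (hinit x))
  rw [h]
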